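-- pv_equiv track=rewrite | github.com/Charlie-Ren/ML5525 | hw1-logistic.py | count
-- ===== SOURCE A (Python) =====
-- def count(y_train):
--     pos=0
--     neg=0
--     for i in range(len(y_train)):
--         if y_train[i]==1:
--             pos+=1
--         else:
--             neg+=1
--     return pos,neg
-- ===== SOURCE B (Python) =====
-- def count(y_train):
--     def go(lo, hi):
--         if hi - lo == 0:
--             return (0, 0)
--         if hi - lo == 1:
--             return (1, 0) if y_train[lo] == 1 else (0, 1)
--         mid = (lo + hi) // 2
--         p1, n1 = go(lo, mid)
--         p2, n2 = go(mid, hi)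
--         return (p1 + p2, n1 + n2)
--     return go(0, len(y_train))
-- ===== Notes on version B (the rewrite author's own statement) =====
-- stated objective: alternative
-- what changed: B replaces the indexed loop with two branch-updated accumulators by a divide-and-conquer recursion: it splits the index range in half, counts each half recursively, and adds the (pos, neg) pairs.
import Mathlib
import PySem

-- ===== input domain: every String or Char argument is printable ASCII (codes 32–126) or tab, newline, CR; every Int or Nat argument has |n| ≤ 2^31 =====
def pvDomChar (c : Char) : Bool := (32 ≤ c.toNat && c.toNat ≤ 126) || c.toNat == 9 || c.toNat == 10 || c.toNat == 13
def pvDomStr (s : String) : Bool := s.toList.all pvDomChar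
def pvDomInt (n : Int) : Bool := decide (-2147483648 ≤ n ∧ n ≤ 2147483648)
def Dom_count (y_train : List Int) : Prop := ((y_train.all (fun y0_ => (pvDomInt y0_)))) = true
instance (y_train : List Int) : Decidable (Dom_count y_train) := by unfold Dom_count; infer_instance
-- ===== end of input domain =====

-- B counts by divide-and-conquer on the index range instead of a single loop with two accumulators; objective: alternative.

-- ===== PORT A =====
-- indexed loop over range(len(y_train)) with two accumulators (pos, neg)
def count (y_train : List Int) : Int × Int :=
  (PySem.List.pyRange 0 y_train.length 1).foldl
    (fun st i =>
      if PySem.List.pyGetD y_train i 0 == 1 then (st.1 + 1, st.2) else (st.1, st.2 + 1))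
    (0, 0)

-- ===== PORT B =====
-- go(lo, hi): split the half-open index range [lo, hi) at mid = (lo+hi)//2, count each
-- half recursively, add the (pos, neg) pairs.  lo, hi are the nonnegative indices Python's
-- go is ever called with, so Nat with Nat division is exact here.
-- fuel ≥ hi - lo is a pure totality guard (structural recursion); it never changes the value.
def countGo (l : List Int) (fuel lo hi : Nat) : Int × Int :=
  match fuel with
  | 0 => (0, 0)
  | Nat.succ f =>
    if hi - lo = 0 then (0, 0)
    else if hi - lo = 1 then
      (if PySem.List.pyGetD l (lo : Int) 0 == 1 then (1, 0) else (0, 1))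
    else
      let p := countGo l f lo ((lo + hi) / 2)
      let q := countGo l f ((lo + hi) / 2) hi
      (p.1 + q.1, p.2 + q.2)

def count_alt (y_train : List Int) : Int × Int := countGo y_train y_train.length 0 y_train.length

-- ===== PRECONDITION & SPEC =====
def Spec_count (y_train : List Int) (out : Int × Int) : Prop := out = count_alt y_train
instance (y_train : List Int) (out : Int × Int) : Decidable (Spec_count y_train out) := by unfold Spec_count; infer_instance

-- ===== CLAIM (what is proved, stated in full; the proofs are below) =====
def Claim_equal_count : Prop := ∀ (y_train : List Int), Dom_count y_train → Spec_count y_train (count y_train)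

-- ===== LEMMAS AND PROOFS =====

-- A's fold computes (#1s, #non-1s) with the accumulator added on.
theorem countA_key (l : List Int) (a b : Int) :
    l.foldl (fun (st : Int × Int) v => if v == 1 then (st.1 + 1, st.2) else (st.1, st.2 + 1)) (a, b)
      = (a + l.count 1, b + ((l.length : Int) - l.count 1)) := by
  induction l generalizing a b with
  | nil => simp
  | cons x xs ih =>
    by_cases h : x = 1
    · simp only [List.foldl_cons]
      rw [if_pos (show (x == (1 : Int)) = true by simp [h]), ih]
      simp only [Prod.mk.injEq, List.count_cons, List.length_cons, h, beq_self_eq_true, ite_true]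
      constructor <;> (push_cast; ring)
    · simp only [List.foldl_cons]
      rw [if_neg (show ¬ (x == (1 : Int)) = true by simp [h]), ih]
      simp only [Prod.mk.injEq, List.count_cons, List.length_cons]
      rw [if_neg (show ¬ (x == (1 : Int)) = true by simp [h])]
      constructor <;> (push_cast; ring)

-- B's divide-and-conquer on [lo, hi) computes (#1s, #non-1s) of that index slice.
theorem countGo_eq (l : List Int) :
    ∀ (n lo hi : Nat), hi - lo ≤ n → lo ≤ hi → hi ≤ l.length →
      countGo l n lo hi
        = (((((l.drop lo).take (hi - lo)).count 1 : Nat) : Int),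
           ((hi : Int) - (lo : Int)) - ((((l.drop lo).take (hi - lo)).count 1 : Nat) : Int)) := by
  intro n
  induction n with
  | zero =>
    intro lo hi hle hlohi hhi
    have h0 : hi - lo = 0 := by omega
    simp only [countGo]
    simp [h0]
    omega
  | succ n ih =>
    intro lo hi hle hlohi hhi
    by_cases h0 : hi - lo = 0
    · simp only [countGo]
      rw [if_pos h0]
      simp [h0]
      omega
    · by_cases h1 : hi - lo = 1
      · simp only [countGo]
        rw [if_neg h0, if_pos h1]
        have hlt : lo < l.length := by omega
        have hget : PySem.List.pyGetD l (lo : Int) 0 = l[lo] := by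
          rw [PySem.List.pyGetD_natCast]
          simp [List.getD, hlt]
        have htake : (l.drop lo).take (hi - lo) = [l[lo]] := by
          rw [h1]
          rw [List.take_one]
          have : (l.drop lo).head? = some l[lo] := by
            rw [List.head?_drop]
            simp [hlt]
          simp [this]
        rw [hget, htake]
        by_cases hv : l[lo] = 1
        · rw [if_pos (by simp [hv])]
          simp [hv]
          omega
        · rw [if_neg (by simp [hv])]
          simp [hv]
          omega
      · simp only [countGo]
        rw [if_neg h0, if_neg h1]
        have hm1 : lo ≤ (lo + hi) / 2 := by omega
        have hm2 : (lo + hi) / 2 ≤ hi := by omega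
        have hm3 : lo < (lo + hi) / 2 := by omega
        have hm4 : (lo + hi) / 2 < hi := by omega
        rw [ih lo ((lo + hi) / 2) (by omega) hm1 (by omega),
            ih ((lo + hi) / 2) hi (by omega) hm2 hhi]
        have hsplit : (l.drop lo).take (hi - lo)
            = (l.drop lo).take ((lo + hi) / 2 - lo)
              ++ (l.drop ((lo + hi) / 2)).take (hi - (lo + hi) / 2) := by
          have harith : hi - lo = ((lo + hi) / 2 - lo) + (hi - (lo + hi) / 2) := by omega
          have hdd : (l.drop lo).drop ((lo + hi) / 2 - lo) = l.drop ((lo + hi) / 2) := by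
            rw [List.drop_drop]
            have : lo + ((lo + hi) / 2 - lo) = (lo + hi) / 2 := by omega
            rw [this]
          rw [harith, List.take_add, hdd]
        rw [hsplit, List.count_append]
        simp only [Prod.mk.injEq]
        constructor <;> (push_cast; ring)

-- ===== VERDICT (by name: the statement is the Claim_ definition above) =====
theorem count_spec : Claim_equal_count := by
  intro l _
  show count l = count_alt l
  unfold count count_alt
  rw [PySem.List.foldl_pyRange_zero_pyGetD' l 0
    (fun (st : Int × Int) (v : Int) => if v == 1 then (st.1 + 1, st.2) else (st.1, st.2 + 1)) (0, 0)]
  rw [countA_key, countGo_eq l l.length 0 l.length (by omega) (by omega) (by omega)]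
  simp
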